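-- pv_equiv track=rewrite | github.com/BaseThesis-Labs/VoiceLoop | packages/arena-api/app/services/stt_metrics.py | compute_word_diff
-- ===== SOURCE A (Python) =====
-- def compute_word_diff(reference: str, hypothesis: str) -> list[dict]:
--     """Compute word-level alignment diff between reference and hypothesis.
--
--     Returns list of diff operations:
--       - {"word": "hello", "type": "correct"}
--       - {"word": "world", "ref_word": "word", "type": "substitution"}
--       - {"word": "extra", "type": "insertion"}
--       - {"ref_word": "missing", "type": "deletion"}
--     """
--     ref_words = reference.lower().split()
--     hyp_words = hypothesis.lower().split()
--
--     n = len(ref_words)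
--     m = len(hyp_words)
--
--     dp = [[0] * (m + 1) for _ in range(n + 1)]
--     ops = [[""] * (m + 1) for _ in range(n + 1)]
--
--     for i in range(n + 1):
--         dp[i][0] = i
--         if i > 0:
--             ops[i][0] = "delete"
--     for j in range(m + 1):
--         dp[0][j] = j
--         if j > 0:
--             ops[0][j] = "insert"
--
--     for i in range(1, n + 1):
--         for j in range(1, m + 1):
--             if ref_words[i - 1] == hyp_words[j - 1]:
--                 dp[i][j] = dp[i - 1][j - 1]
--                 ops[i][j] = "match"
--             else:
--                 costs = [
--                     (dp[i - 1][j - 1] + 1, "substitute"),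
--                     (dp[i - 1][j] + 1, "delete"),
--                     (dp[i][j - 1] + 1, "insert"),
--                 ]
--                 dp[i][j], ops[i][j] = min(costs, key=lambda x: x[0])
--
--     diff = []
--     i, j = n, m
--     while i > 0 or j > 0:
--         op = ops[i][j]
--         if op == "match":
--             diff.append({"word": hyp_words[j - 1], "type": "correct"})
--             i -= 1
--             j -= 1
--         elif op == "substitute":
--             diff.append({"word": hyp_words[j - 1], "ref_word": ref_words[i - 1], "type": "substitution"})
--             i -= 1
--             j -= 1
--         elif op == "delete":
--             diff.append({"ref_word": ref_words[i - 1], "type": "deletion"})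
--             i -= 1
--         elif op == "insert":
--             diff.append({"word": hyp_words[j - 1], "type": "insertion"})
--             j -= 1
--         else:
--             break
--
--     diff.reverse()
--     return diff
-- ===== SOURCE B (Python) =====
-- def compute_word_diff(reference: str, hypothesis: str) -> list[dict]:
--     """Word-level alignment diff, computed in ONE forward DP pass: each cell
--     carries (cost, path) where path is a persistent linked list (entry, tail)
--     of diff ops ending at that cell (last op first). No ops matrix, no
--     backtracking pass over a table; only the previous row is kept."""
--     ref_words = reference.lower().split()
--     hyp_words = hypothesis.lower().split()
--
--     # row 0: pure insertions
--     row = [(0, None)]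
--     for hw in hyp_words:
--         cost, path = row[-1]
--         row.append((cost + 1, ({"word": hw, "type": "insertion"}, path)))
--
--     for rw in ref_words:
--         cost, path = row[0]
--         new = [(cost + 1, ({"ref_word": rw, "type": "deletion"}, path))]
--         for j, hw in enumerate(hyp_words):
--             if rw == hw:
--                 c, p = row[j]
--                 new.append((c, ({"word": hw, "type": "correct"}, p)))
--             else:
--                 dc, dpp = row[j]
--                 uc, up = row[j + 1]
--                 lc, lp = new[j]
--                 cand = [
--                     (dc + 1, ({"word": hw, "ref_word": rw, "type": "substitution"}, dpp)),
--                     (uc + 1, ({"ref_word": rw, "type": "deletion"}, up)),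
--                     (lc + 1, ({"word": hw, "type": "insertion"}, lp)),
--                 ]
--                 new.append(min(cand, key=lambda t: t[0]))
--         row = new
--
--     diff = []
--     path = row[-1][1]
--     while path is not None:
--         entry, path = path
--         diff.append(entry)
--     diff.reverse()
--     return diff
-- ===== Notes on version B (the rewrite author's own statement) =====
-- stated objective: alternative
-- what changed: B computes the alignment in a single forward DP pass that propagates persistent linked diff paths alongside the costs (keeping only the previous row), so there is no ops matrix and no backtracking pass over a stored table; the answer is read off the final cell.
import Mathlib
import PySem

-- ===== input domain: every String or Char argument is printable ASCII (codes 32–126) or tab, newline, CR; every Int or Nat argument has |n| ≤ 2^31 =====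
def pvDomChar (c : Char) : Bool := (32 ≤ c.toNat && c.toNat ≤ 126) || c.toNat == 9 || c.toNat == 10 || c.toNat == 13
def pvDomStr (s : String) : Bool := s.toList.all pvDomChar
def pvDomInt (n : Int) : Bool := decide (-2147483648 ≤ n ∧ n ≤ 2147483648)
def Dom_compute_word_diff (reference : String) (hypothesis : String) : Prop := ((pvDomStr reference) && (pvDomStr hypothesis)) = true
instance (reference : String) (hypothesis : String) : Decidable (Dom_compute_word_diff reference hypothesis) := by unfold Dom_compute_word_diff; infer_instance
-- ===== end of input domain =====

-- B replaces A's two-matrix DP + backtracking with a single forward pass that propagates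
-- persistent linked diff paths alongside the costs (objective: alternative decomposition).

-- ===== PORT A =====
-- Python min(costs, key=fst) on the literal 3-element list: fold keeping the FIRST minimal
-- (ported by hand; exact: Python's min keeps the earliest element on ties).
def pvAMin3 (a b c : Nat × String) : Nat × String :=
  let best2 := if b.1 < a.1 then b else a
  if c.1 < best2.1 then c else best2

-- inner loop 'for j in range(1, m+1)': walks the previous dp row (diag = dp[i-1][j-1],
-- up = dp[i-1][j]) carrying left = dp[i][j-1]; returns (dp row tail, ops row tail)
def pvAFill (rw : String) (diag : Nat) (prevTail : List Nat) (left : Nat)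
    (hws : List String) : List Nat × List String :=
  match hws, prevTail with
  | hw :: hs, up :: rest =>
      let co := if rw == hw then (diag, "match")
                else pvAMin3 (diag + 1, "substitute") (up + 1, "delete") (left + 1, "insert")
      let tl := pvAFill rw up rest co.1 hs
      (co.1 :: tl.1, co.2 :: tl.2)
  | _, _ => ([], [])

-- outer loop 'for i in range(1, n+1)': row i has dp[i][0] = i, ops[i][0] = "delete"
def pvARows (hypW : List String) : Nat → List Nat → List String → List (List Nat × List String)
  | _, _, [] => []
  | i, prev, rw :: rs =>
      let f := pvAFill rw (prev.headD 0) prev.tail i hypW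
      (i :: f.1, "delete" :: f.2) :: pvARows hypW (i + 1) (i :: f.1) rs

-- the 'while i > 0 or j > 0' backtracking loop, reading the stored ops matrix; fuel n+m suffices
def pvABack (refW hypW : List String) (ops : List (List String)) :
    Nat → Nat → Nat → List (List (String × String)) → List (List (String × String))
  | 0, _, _, acc => acc
  | fuel + 1, i, j, acc =>
      if i = 0 ∧ j = 0 then acc
      else
        let op := (ops.getD i []).getD j ""
        if op = "match" then
          pvABack refW hypW ops fuel (i - 1) (j - 1)
            (acc ++ [[("word", hypW.getD (j - 1) ""), ("type", "correct")]])
        else if op = "substitute" then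
          pvABack refW hypW ops fuel (i - 1) (j - 1)
            (acc ++ [[("word", hypW.getD (j - 1) ""), ("ref_word", refW.getD (i - 1) ""), ("type", "substitution")]])
        else if op = "delete" then
          pvABack refW hypW ops fuel (i - 1) j
            (acc ++ [[("ref_word", refW.getD (i - 1) ""), ("type", "deletion")]])
        else if op = "insert" then
          pvABack refW hypW ops fuel i (j - 1)
            (acc ++ [[("word", hypW.getD (j - 1) ""), ("type", "insertion")]])
        else acc   -- Python's 'else: break'

def compute_word_diff (reference : String) (hypothesis : String) : List (List (String × String)) :=
  let refW := PySem.Str.split₀ (PySem.Str.lower reference)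
  let hypW := PySem.Str.split₀ (PySem.Str.lower hypothesis)
  let n := refW.length
  let m := hypW.length
  -- row 0: dp[0][j] = j, ops[0][0] = "", ops[0][j] = "insert" (j ≥ 1)
  let row0 : List Nat × List String := (List.range (m + 1), "" :: List.replicate m "insert")
  let table := row0 :: pvARows hypW 1 row0.1 refW
  (pvABack refW hypW (table.map (·.2)) (n + m) n m []).reverse

-- ===== PORT B =====
-- Source B's min(cand, key=fst): keep the FIRST minimal of the three (cost, path) cells
def pvBMin3 (a b c : Nat × List (List (String × String))) : Nat × List (List (String × String)) :=
  let best2 := if b.1 < a.1 then b else a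
  if c.1 < best2.1 then c else best2

-- Source B's first loop: build row 0 (pure insertions), each cell from the previous one
def pvBInit : (Nat × List (List (String × String))) → List String → List (Nat × List (List (String × String)))
  | _, [] => []
  | c, hw :: hs =>
      let c' := (c.1 + 1, [("word", hw), ("type", "insertion")] :: c.2)
      c' :: pvBInit c' hs

-- Source B's inner loop: walk the previous row of cells (diag = row[j], up = row[j+1])
-- carrying the cell just written (left = new[j]); each cell is (cost, linked path)
def pvBCells (rw : String) (diag : Nat × List (List (String × String)))
    (prevTail : List (Nat × List (List (String × String))))
    (left : Nat × List (List (String × String))) (hws : List String) :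
    List (Nat × List (List (String × String))) :=
  match hws, prevTail with
  | hw :: hs, up :: rest =>
      let c := if rw == hw then (diag.1, [("word", hw), ("type", "correct")] :: diag.2)
               else pvBMin3
                 (diag.1 + 1, [("word", hw), ("ref_word", rw), ("type", "substitution")] :: diag.2)
                 (up.1 + 1, [("ref_word", rw), ("type", "deletion")] :: up.2)
                 (left.1 + 1, [("word", hw), ("type", "insertion")] :: left.2)
      c :: pvBCells rw up rest c hs
  | _, _ => []

-- Source B's outer loop: replace the row by the next one; returns the FINAL row
def pvBRows (hypW : List String) :
    List (Nat × List (List (String × String))) → List String →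
    List (Nat × List (List (String × String)))
  | row, [] => row
  | row, rw :: rs =>
      let h := row.headD (0, [])
      let l := (h.1 + 1, [("ref_word", rw), ("type", "deletion")] :: h.2)
      pvBRows hypW (l :: pvBCells rw h row.tail l hypW) rs

-- Source B's final while loop: unwind the linked path into a list
def pvCollect : List (List (String × String)) → List (List (String × String)) → List (List (String × String))
  | [], acc => acc
  | e :: p, acc => pvCollect p (acc ++ [e])

def compute_word_diff_alt (reference : String) (hypothesis : String) : List (List (String × String)) :=
  let refW := PySem.Str.split₀ (PySem.Str.lower reference)
  let hypW := PySem.Str.split₀ (PySem.Str.lower hypothesis)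
  let row0 := ((0, []) : Nat × List (List (String × String))) :: pvBInit (0, []) hypW
  let final := pvBRows hypW row0 refW
  (pvCollect (final.getLastD (0, [])).2 []).reverse

-- ===== PRECONDITION & SPEC =====
def Spec_compute_word_diff (reference : String) (hypothesis : String) (out : List (List (String × String))) : Prop := out = compute_word_diff_alt reference hypothesis
instance (reference : String) (hypothesis : String) (out : List (List (String × String))) : Decidable (Spec_compute_word_diff reference hypothesis out) := by unfold Spec_compute_word_diff; infer_instance

-- ===== CLAIM (what is proved, stated in full; the proofs are below) =====
def Claim_equal_compute_word_diff : Prop := ∀ (reference : String) (hypothesis : String), Dom_compute_word_diff reference hypothesis → Spec_compute_word_diff reference hypothesis (compute_word_diff reference hypothesis)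

-- ===== LEMMAS AND PROOFS =====

-- the Levenshtein cost dp[i][j] as a function
def pvLev (refW hypW : List String) : Nat → Nat → Nat
  | 0, j => j
  | i + 1, 0 => i + 1
  | i + 1, j + 1 =>
      if refW.getD i "" == hypW.getD j "" then pvLev refW hypW i j
      else 1 + min (min (pvLev refW hypW i j) (pvLev refW hypW i (j + 1))) (pvLev refW hypW (i + 1) j)
  termination_by i j => (i, j)

-- the op stored by A at (i, j)
def pvOp (refW hypW : List String) : Nat → Nat → String
  | 0, 0 => ""
  | 0, _ + 1 => "insert"
  | _ + 1, 0 => "delete"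
  | i + 1, j + 1 =>
      if refW.getD i "" == hypW.getD j "" then "match"
      else (pvAMin3 (pvLev refW hypW i j + 1, "substitute")
                    (pvLev refW hypW i (j + 1) + 1, "delete")
                    (pvLev refW hypW (i + 1) j + 1, "insert")).2

-- the alignment path ending at (i, j), LAST op first (B's linked-path order)
def pvPath (refW hypW : List String) : Nat → Nat → List (List (String × String))
  | 0, 0 => []
  | 0, j + 1 => [("word", hypW.getD j ""), ("type", "insertion")] :: pvPath refW hypW 0 j
  | i + 1, 0 => [("ref_word", refW.getD i ""), ("type", "deletion")] :: pvPath refW hypW i 0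
  | i + 1, j + 1 =>
      if refW.getD i "" == hypW.getD j "" then
        [("word", hypW.getD j ""), ("type", "correct")] :: pvPath refW hypW i j
      else
        (pvBMin3
          (pvLev refW hypW i j + 1,
            [("word", hypW.getD j ""), ("ref_word", refW.getD i ""), ("type", "substitution")] :: pvPath refW hypW i j)
          (pvLev refW hypW i (j + 1) + 1,
            [("ref_word", refW.getD i ""), ("type", "deletion")] :: pvPath refW hypW i (j + 1))
          (pvLev refW hypW (i + 1) j + 1,
            [("word", hypW.getD j ""), ("type", "insertion")] :: pvPath refW hypW (i + 1) j)).2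
  termination_by i j => (i, j)

def pvCell (refW hypW : List String) (i j : Nat) : Nat × List (List (String × String)) :=
  (pvLev refW hypW i j, pvPath refW hypW i j)

theorem pvLev_zero_right (refW hypW : List String) (i : Nat) : pvLev refW hypW i 0 = i := by
  cases i <;> simp [pvLev]

theorem pvLev_zero_left (refW hypW : List String) (j : Nat) : pvLev refW hypW 0 j = j := by
  rw [pvLev]

theorem pvLev_succ_succ (refW hypW : List String) (i j : Nat) :
    pvLev refW hypW (i + 1) (j + 1)
      = if refW.getD i "" == hypW.getD j "" then pvLev refW hypW i j
        else 1 + min (min (pvLev refW hypW i j) (pvLev refW hypW i (j + 1))) (pvLev refW hypW (i + 1) j) := by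
  rw [pvLev]

theorem pvOp_succ_succ (refW hypW : List String) (i j : Nat) :
    pvOp refW hypW (i + 1) (j + 1)
      = if refW.getD i "" == hypW.getD j "" then "match"
        else (pvAMin3 (pvLev refW hypW i j + 1, "substitute")
                      (pvLev refW hypW i (j + 1) + 1, "delete")
                      (pvLev refW hypW (i + 1) j + 1, "insert")).2 := by
  rw [pvOp]

theorem pvPath_zero_zero (refW hypW : List String) : pvPath refW hypW 0 0 = [] := by
  rw [pvPath]

theorem pvPath_zero_succ (refW hypW : List String) (j : Nat) :
    pvPath refW hypW 0 (j + 1)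
      = [("word", hypW.getD j ""), ("type", "insertion")] :: pvPath refW hypW 0 j := by
  rw [pvPath]

theorem pvPath_succ_zero (refW hypW : List String) (i : Nat) :
    pvPath refW hypW (i + 1) 0
      = [("ref_word", refW.getD i ""), ("type", "deletion")] :: pvPath refW hypW i 0 := by
  rw [pvPath]

theorem pvPath_succ_succ (refW hypW : List String) (i j : Nat) :
    pvPath refW hypW (i + 1) (j + 1)
      = if refW.getD i "" == hypW.getD j "" then
          [("word", hypW.getD j ""), ("type", "correct")] :: pvPath refW hypW i j
        else
          (pvBMin3
            (pvLev refW hypW i j + 1,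
              [("word", hypW.getD j ""), ("ref_word", refW.getD i ""), ("type", "substitution")] :: pvPath refW hypW i j)
            (pvLev refW hypW i (j + 1) + 1,
              [("ref_word", refW.getD i ""), ("type", "deletion")] :: pvPath refW hypW i (j + 1))
            (pvLev refW hypW (i + 1) j + 1,
              [("word", hypW.getD j ""), ("type", "insertion")] :: pvPath refW hypW (i + 1) j)).2 := by
  rw [pvPath]

theorem pvAMin3_fst (d u l : Nat) (s1 s2 s3 : String) :
    (pvAMin3 (d + 1, s1) (u + 1, s2) (l + 1, s3)).1 = 1 + min (min d u) l := by
  simp only [pvAMin3]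
  split_ifs <;> simp_all <;> omega

theorem pvBMin3_fst (d u l : Nat) (a b c : List (List (String × String))) :
    (pvBMin3 (d + 1, a) (u + 1, b) (l + 1, c)).1 = 1 + min (min d u) l := by
  simp only [pvBMin3]
  split_ifs <;> simp_all <;> omega

theorem pvBMin3_snd_a (d u l : Nat) (a b c : List (List (String × String)))
    (h1 : ¬ u < d) (h2 : ¬ l < d) :
    (pvBMin3 (d + 1, a) (u + 1, b) (l + 1, c)).2 = a := by
  simp only [pvBMin3]
  rw [if_neg (show ¬ (u + 1, b).1 < (d + 1, a).1 from by simp; omega),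
      if_neg (show ¬ (l + 1, c).1 < (d + 1, a).1 from by simp; omega)]

theorem pvBMin3_snd_b (d u l : Nat) (a b c : List (List (String × String)))
    (h1 : u < d) (h2 : ¬ l < u) :
    (pvBMin3 (d + 1, a) (u + 1, b) (l + 1, c)).2 = b := by
  simp only [pvBMin3]
  rw [if_pos (show (u + 1, b).1 < (d + 1, a).1 from by simp; omega),
      if_neg (show ¬ (l + 1, c).1 < (u + 1, b).1 from by simp; omega)]

theorem pvBMin3_snd_c1 (d u l : Nat) (a b c : List (List (String × String)))
    (h1 : u < d) (h2 : l < u) :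
    (pvBMin3 (d + 1, a) (u + 1, b) (l + 1, c)).2 = c := by
  simp only [pvBMin3]
  rw [if_pos (show (u + 1, b).1 < (d + 1, a).1 from by simp; omega),
      if_pos (show (l + 1, c).1 < (u + 1, b).1 from by simp; omega)]

theorem pvBMin3_snd_c2 (d u l : Nat) (a b c : List (List (String × String)))
    (h1 : ¬ u < d) (h2 : l < d) :
    (pvBMin3 (d + 1, a) (u + 1, b) (l + 1, c)).2 = c := by
  simp only [pvBMin3]
  rw [if_neg (show ¬ (u + 1, b).1 < (d + 1, a).1 from by simp; omega),
      if_pos (show (l + 1, c).1 < (d + 1, a).1 from by simp; omega)]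

-- ---- A side: the forward pass stores pvLev / pvOp ----

theorem pvAFill_spec (refW hypW : List String) (i : Nat) :
    ∀ (e k : Nat), e + k = hypW.length →
    pvAFill (refW.getD i "") (pvLev refW hypW i k)
        ((List.range e).map (fun t => pvLev refW hypW i (k + 1 + t)))
        (pvLev refW hypW (i + 1) k) (hypW.drop k)
      = ((List.range e).map (fun t => pvLev refW hypW (i + 1) (k + 1 + t)),
         (List.range e).map (fun t => pvOp refW hypW (i + 1) (k + 1 + t))) := by
  intro e
  induction e with
  | zero =>
      intro k hk
      rw [List.drop_eq_nil_of_le (by omega)]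
      simp [pvAFill]
  | succ e ih =>
      intro k hk
      have hk' : k < hypW.length := by omega
      have hget : hypW[k] = hypW.getD k "" := (List.getD_eq_getElem hypW "" hk').symm
      have harith : ∀ t, k + 1 + 1 + t = k + 1 + (t + 1) := fun t => by omega
      have hco : (if refW.getD i "" == hypW[k] then (pvLev refW hypW i k, "match")
            else pvAMin3 (pvLev refW hypW i k + 1, "substitute")
                 (pvLev refW hypW i (k + 1) + 1, "delete")
                 (pvLev refW hypW (i + 1) k + 1, "insert"))
          = (pvLev refW hypW (i + 1) (k + 1), pvOp refW hypW (i + 1) (k + 1)) := by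
        rw [hget, pvLev_succ_succ, pvOp_succ_succ]
        by_cases h : (refW.getD i "" == hypW.getD k "") = true
        · rw [if_pos h, if_pos h, if_pos h]
        · rw [if_neg h, if_neg h, if_neg h]
          exact Prod.ext (pvAMin3_fst _ _ _ _ _ _) rfl
      have IH := ih (k + 1) (by omega)
      simp only [harith] at IH
      rw [List.drop_eq_getElem_cons hk']
      simp only [List.range_succ_eq_map, List.map_cons, List.map_map, Function.comp_def, Nat.add_zero]
      simp only [pvAFill, hco, IH]

-- row i of the dp table / of the ops table, as functions of i
def pvRowFn (refW hypW : List String) (i : Nat) : List Nat :=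
  (List.range (hypW.length + 1)).map (fun j => pvLev refW hypW i j)

def pvOpsFn (refW hypW : List String) (i : Nat) : List String :=
  (List.range (hypW.length + 1)).map (fun j => pvOp refW hypW i j)

theorem pvRowFn_cons (refW hypW : List String) (i : Nat) :
    pvRowFn refW hypW i
      = pvLev refW hypW i 0 :: (List.range hypW.length).map (fun t => pvLev refW hypW i (0 + 1 + t)) := by
  simp only [pvRowFn, List.range_succ_eq_map, List.map_cons, List.map_map, Function.comp_def]
  have harith : ∀ t : Nat, 0 + 1 + t = t + 1 := fun t => by omega
  simp only [harith]

theorem pvOpsFn_succ (refW hypW : List String) (i : Nat) :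
    pvOpsFn refW hypW (i + 1)
      = "delete" :: (List.range hypW.length).map (fun t => pvOp refW hypW (i + 1) (0 + 1 + t)) := by
  simp only [pvOpsFn, List.range_succ_eq_map, List.map_cons, List.map_map, Function.comp_def]
  have harith : ∀ t : Nat, 0 + 1 + t = t + 1 := fun t => by omega
  simp only [harith]
  rfl

theorem pvARows_spec (refW hypW : List String) :
    ∀ (e k : Nat), e + k = refW.length →
    pvARows hypW (k + 1) (pvRowFn refW hypW k) (refW.drop k)
      = (List.range e).map (fun t => (pvRowFn refW hypW (k + 1 + t), pvOpsFn refW hypW (k + 1 + t))) := by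
  intro e
  induction e with
  | zero =>
      intro k hk
      rw [List.drop_eq_nil_of_le (by omega)]
      simp [pvARows]
  | succ e ih =>
      intro k hk
      have hk' : k < refW.length := by omega
      have hget : refW[k] = refW.getD k "" := (List.getD_eq_getElem refW "" hk').symm
      have harith : ∀ t, k + 1 + 1 + t = k + 1 + (t + 1) := fun t => by omega
      have hfill := pvAFill_spec refW hypW k hypW.length 0 (by omega)
      simp only [List.drop_zero] at hfill
      rw [pvLev_zero_right, pvLev_zero_right] at hfill
      have IH := ih (k + 1) (by omega)
      simp only [harith] at IH
      rw [pvRowFn_cons refW hypW (k + 1), pvLev_zero_right] at IH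
      rw [List.drop_eq_getElem_cons hk']
      simp only [List.range_succ_eq_map, List.map_cons, List.map_map, Function.comp_def, Nat.add_zero]
      rw [pvRowFn_cons refW hypW k]
      simp only [pvARows, List.headD_cons, List.tail_cons, hget]
      rw [pvLev_zero_right, hfill]
      simp only []
      rw [IH]
      congr 1
      rw [pvRowFn_cons refW hypW (k + 1), pvOpsFn_succ refW hypW k, pvLev_zero_right]

theorem getD_cons_map_range {α : Type} (f : Nat → α) (n : Nat) (d : α) (i : Nat) (hi : i ≤ n) :
    (f 0 :: (List.range n).map (fun t => f (1 + t))).getD i d = f i := by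
  cases i with
  | zero => rfl
  | succ t =>
      simp only [List.getD_cons_succ]
      rw [List.getD_eq_getElem?_getD, List.getElem?_map, List.getElem?_range (by omega)]
      simp [Nat.add_comm]

theorem getD_map_range {α : Type} (f : Nat → α) (n : Nat) (d : α) (i : Nat) (hi : i < n) :
    ((List.range n).map (fun t => f t)).getD i d = f i := by
  rw [List.getD_eq_getElem?_getD, List.getElem?_map, List.getElem?_range hi]
  rfl

theorem pvOpsFn_zero (refW hypW : List String) :
    pvOpsFn refW hypW 0 = "" :: List.replicate hypW.length "insert" := by
  simp only [pvOpsFn, List.range_succ_eq_map, List.map_cons, List.map_map, Function.comp_def]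
  congr 1
  rw [show (fun x : Nat => pvOp refW hypW 0 x.succ) = fun _ => ("insert" : String) from rfl]
  simp [List.map_const']

-- ---- A side: backtracking over a correct ops table yields pvPath ----

theorem pvABack_path (refW hypW : List String) (opsT : List (List String))
    (hops : ∀ i j, i ≤ refW.length → j ≤ hypW.length →
      (opsT.getD i []).getD j "" = pvOp refW hypW i j) :
    ∀ fuel i j acc, i ≤ refW.length → j ≤ hypW.length → i + j ≤ fuel →
      pvABack refW hypW opsT fuel i j acc = acc ++ pvPath refW hypW i j := by
  intro fuel
  induction fuel with
  | zero =>
      intro i j acc hi hj hf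
      have hi0 : i = 0 := by omega
      have hj0 : j = 0 := by omega
      subst hi0; subst hj0
      rw [pvPath_zero_zero]
      simp [pvABack]
  | succ fuel ih =>
      intro i j acc hi hj hf
      simp only [pvABack]
      by_cases h0 : i = 0 ∧ j = 0
      · rw [if_pos h0]
        obtain ⟨h1, h2⟩ := h0; subst h1; subst h2
        rw [pvPath_zero_zero]; simp
      · rw [if_neg h0]
        rcases i with _ | i' <;> rcases j with _ | j'
        · exact absurd ⟨rfl, rfl⟩ h0
        · -- i = 0, j = j' + 1 : stored op is "insert"
          simp only [Nat.add_sub_cancel]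
          rw [hops 0 (j' + 1) (by omega) hj]
          rw [show pvOp refW hypW 0 (j' + 1) = "insert" from rfl]
          rw [if_neg (by decide), if_neg (by decide), if_neg (by decide), if_pos rfl]
          rw [ih 0 j' _ (by omega) (by omega) (by omega), pvPath_zero_succ]
          simp
        · -- i = i' + 1, j = 0 : stored op is "delete"
          simp only [Nat.add_sub_cancel]
          rw [hops (i' + 1) 0 hi (by omega)]
          rw [show pvOp refW hypW (i' + 1) 0 = "delete" from rfl]
          rw [if_neg (by decide), if_neg (by decide), if_pos rfl]
          rw [ih i' 0 _ (by omega) (by omega) (by omega), pvPath_succ_zero]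
          simp
        · -- interior
          simp only [Nat.add_sub_cancel]
          rw [hops (i' + 1) (j' + 1) hi hj, pvOp_succ_succ, pvPath_succ_succ]
          set d := pvLev refW hypW i' j' with hd
          set u := pvLev refW hypW i' (j' + 1) with hu
          set l := pvLev refW hypW (i' + 1) j' with hl
          by_cases heq : (refW.getD i' "" == hypW.getD j' "") = true
          · rw [if_pos heq, if_pos heq]
            rw [ih i' j' _ (by omega) (by omega) (by omega)]
            simp
          · rw [if_neg heq, if_neg heq]
            by_cases h1 : u < d
            · by_cases h2 : l < u
              · -- insert wins
                have hop2 : (pvAMin3 (d + 1, "substitute") (u + 1, "delete") (l + 1, "insert")).2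
                    = "insert" := by
                  simp only [pvAMin3]
                  rw [if_pos (show (u + 1, ("delete" : String)).1 < (d + 1, ("substitute" : String)).1
                        from by omega),
                      if_pos (show (l + 1, ("insert" : String)).1 < (u + 1, ("delete" : String)).1
                        from by omega)]
                rw [hop2,
                    if_neg (show ¬ ("insert" : String) = "match" from by decide),
                    if_neg (show ¬ ("insert" : String) = "substitute" from by decide),
                    if_neg (show ¬ ("insert" : String) = "delete" from by decide),
                    if_pos (show ("insert" : String) = "insert" from rfl),
                    pvBMin3_snd_c1 d u l _ _ _ h1 h2,
                    ih (i' + 1) j' _ hi (by omega) (by omega)]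
                simp
              · -- delete wins
                have hop2 : (pvAMin3 (d + 1, "substitute") (u + 1, "delete") (l + 1, "insert")).2
                    = "delete" := by
                  simp only [pvAMin3]
                  rw [if_pos (show (u + 1, ("delete" : String)).1 < (d + 1, ("substitute" : String)).1
                        from by omega),
                      if_neg (show ¬ (l + 1, ("insert" : String)).1 < (u + 1, ("delete" : String)).1
                        from by omega)]
                rw [hop2,
                    if_neg (show ¬ ("delete" : String) = "match" from by decide),
                    if_neg (show ¬ ("delete" : String) = "substitute" from by decide),
                    if_pos (show ("delete" : String) = "delete" from rfl),
                    pvBMin3_snd_b d u l _ _ _ h1 h2,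
                    ih i' (j' + 1) _ (by omega) hj (by omega)]
                simp
            · by_cases h2 : l < d
              · -- insert wins
                have hop2 : (pvAMin3 (d + 1, "substitute") (u + 1, "delete") (l + 1, "insert")).2
                    = "insert" := by
                  simp only [pvAMin3]
                  rw [if_neg (show ¬ (u + 1, ("delete" : String)).1 < (d + 1, ("substitute" : String)).1
                        from by omega),
                      if_pos (show (l + 1, ("insert" : String)).1 < (d + 1, ("substitute" : String)).1
                        from by omega)]
                rw [hop2,
                    if_neg (show ¬ ("insert" : String) = "match" from by decide),
                    if_neg (show ¬ ("insert" : String) = "substitute" from by decide),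
                    if_neg (show ¬ ("insert" : String) = "delete" from by decide),
                    if_pos (show ("insert" : String) = "insert" from rfl),
                    pvBMin3_snd_c2 d u l _ _ _ h1 h2,
                    ih (i' + 1) j' _ hi (by omega) (by omega)]
                simp
              · -- substitute wins
                have hop2 : (pvAMin3 (d + 1, "substitute") (u + 1, "delete") (l + 1, "insert")).2
                    = "substitute" := by
                  simp only [pvAMin3]
                  rw [if_neg (show ¬ (u + 1, ("delete" : String)).1 < (d + 1, ("substitute" : String)).1
                        from by omega),
                      if_neg (show ¬ (l + 1, ("insert" : String)).1 < (d + 1, ("substitute" : String)).1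
                        from by omega)]
                rw [hop2,
                    if_neg (show ¬ ("substitute" : String) = "match" from by decide),
                    if_pos (show ("substitute" : String) = "substitute" from rfl),
                    pvBMin3_snd_a d u l _ _ _ h1 h2,
                    ih i' j' _ (by omega) (by omega) (by omega)]
                simp

-- ---- B side: the forward pass carries (pvLev, pvPath) cells ----

def pvCellFn (refW hypW : List String) (i : Nat) : List (Nat × List (List (String × String))) :=
  (List.range (hypW.length + 1)).map (fun j => pvCell refW hypW i j)

theorem pvCellFn_cons (refW hypW : List String) (i : Nat) :
    pvCellFn refW hypW i
      = pvCell refW hypW i 0 :: (List.range hypW.length).map (fun t => pvCell refW hypW i (0 + 1 + t)) := by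
  simp only [pvCellFn, List.range_succ_eq_map, List.map_cons, List.map_map, Function.comp_def]
  have harith : ∀ t : Nat, 0 + 1 + t = t + 1 := fun t => by omega
  simp only [harith]

theorem pvCell_zero_zero (refW hypW : List String) : pvCell refW hypW 0 0 = (0, []) := by
  simp only [pvCell, pvLev_zero_left, pvPath_zero_zero]

theorem pvBInit_spec (refW hypW : List String) :
    ∀ (e k : Nat), e + k = hypW.length →
    pvBInit (pvCell refW hypW 0 k) (hypW.drop k)
      = (List.range e).map (fun t => pvCell refW hypW 0 (k + 1 + t)) := by
  intro e
  induction e with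
  | zero =>
      intro k hk
      rw [List.drop_eq_nil_of_le (by omega)]
      simp [pvBInit]
  | succ e ih =>
      intro k hk
      have hk' : k < hypW.length := by omega
      have hget : hypW[k] = hypW.getD k "" := (List.getD_eq_getElem hypW "" hk').symm
      have harith : ∀ t, k + 1 + 1 + t = k + 1 + (t + 1) := fun t => by omega
      have hc : ((pvCell refW hypW 0 k).1 + 1,
            [("word", hypW[k]), ("type", "insertion")] :: (pvCell refW hypW 0 k).2)
          = pvCell refW hypW 0 (k + 1) := by
        simp only [pvCell, hget, pvLev_zero_left, pvPath_zero_succ]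
      have IH := ih (k + 1) (by omega)
      simp only [harith] at IH
      rw [List.drop_eq_getElem_cons hk']
      simp only [List.range_succ_eq_map, List.map_cons, List.map_map, Function.comp_def, Nat.add_zero]
      simp only [pvBInit, hc, IH]

theorem pvBCells_spec (refW hypW : List String) (i : Nat) :
    ∀ (e k : Nat), e + k = hypW.length →
    pvBCells (refW.getD i "") (pvCell refW hypW i k)
        ((List.range e).map (fun t => pvCell refW hypW i (k + 1 + t)))
        (pvCell refW hypW (i + 1) k) (hypW.drop k)
      = (List.range e).map (fun t => pvCell refW hypW (i + 1) (k + 1 + t)) := by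
  intro e
  induction e with
  | zero =>
      intro k hk
      rw [List.drop_eq_nil_of_le (by omega)]
      simp [pvBCells]
  | succ e ih =>
      intro k hk
      have hk' : k < hypW.length := by omega
      have hget : hypW[k] = hypW.getD k "" := (List.getD_eq_getElem hypW "" hk').symm
      have harith : ∀ t, k + 1 + 1 + t = k + 1 + (t + 1) := fun t => by omega
      have hc : (if refW.getD i "" == hypW[k] then
            ((pvCell refW hypW i k).1,
              [("word", hypW[k]), ("type", "correct")] :: (pvCell refW hypW i k).2)
          else pvBMin3
            ((pvCell refW hypW i k).1 + 1,
              [("word", hypW[k]), ("ref_word", refW.getD i ""), ("type", "substitution")] :: (pvCell refW hypW i k).2)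
            ((pvCell refW hypW i (k + 1)).1 + 1,
              [("ref_word", refW.getD i ""), ("type", "deletion")] :: (pvCell refW hypW i (k + 1)).2)
            ((pvCell refW hypW (i + 1) k).1 + 1,
              [("word", hypW[k]), ("type", "insertion")] :: (pvCell refW hypW (i + 1) k).2))
          = pvCell refW hypW (i + 1) (k + 1) := by
        simp only [pvCell, hget]
        by_cases h : (refW.getD i "" == hypW.getD k "") = true
        · rw [if_pos h]
          exact Prod.ext (by rw [pvLev_succ_succ, if_pos h]) (by rw [pvPath_succ_succ, if_pos h])
        · rw [if_neg h]
          refine Prod.ext ?_ ?_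
          · rw [pvBMin3_fst, pvLev_succ_succ, if_neg h]
          · rw [pvPath_succ_succ, if_neg h]
      have IH := ih (k + 1) (by omega)
      simp only [harith] at IH
      rw [List.drop_eq_getElem_cons hk']
      simp only [List.range_succ_eq_map, List.map_cons, List.map_map, Function.comp_def, Nat.add_zero]
      simp only [pvBCells, hc, IH]

theorem pvBRows_spec (refW hypW : List String) :
    ∀ (e k : Nat), e + k = refW.length →
    pvBRows hypW (pvCellFn refW hypW k) (refW.drop k) = pvCellFn refW hypW (k + e) := by
  intro e
  induction e with
  | zero =>
      intro k hk
      rw [List.drop_eq_nil_of_le (by omega)]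
      simp [pvBRows]
  | succ e ih =>
      intro k hk
      have hk' : k < refW.length := by omega
      have hget : refW[k] = refW.getD k "" := (List.getD_eq_getElem refW "" hk').symm
      have hl : ((pvCell refW hypW k 0).1 + 1,
            [("ref_word", refW[k]), ("type", "deletion")] :: (pvCell refW hypW k 0).2)
          = pvCell refW hypW (k + 1) 0 := by
        simp only [pvCell, hget, pvLev_zero_right, pvPath_succ_zero]
      have hcells := pvBCells_spec refW hypW k hypW.length 0 (by omega)
      simp only [List.drop_zero] at hcells
      have IH := ih (k + 1) (by omega)
      have harith : k + (e + 1) = (k + 1) + e := by omega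
      rw [List.drop_eq_getElem_cons hk', harith, ← IH]
      rw [pvCellFn_cons refW hypW k]
      simp only [pvBRows, List.headD_cons, List.tail_cons, hget]
      rw [show refW[k] = refW.getD k "" from hget] at hl
      rw [hl, hcells, ← pvCellFn_cons]

theorem pvCollect_eq (p acc : List (List (String × String))) :
    pvCollect p acc = acc ++ p := by
  induction p generalizing acc with
  | nil => simp [pvCollect]
  | cons e p ih => simp [pvCollect, ih]

theorem getLastD_map_range {α : Type} (f : Nat → α) (n : Nat) (d : α) :
    ((List.range (n + 1)).map (fun j => f j)).getLastD d = f n := by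
  rw [List.range_succ, List.map_append]
  simp

-- ===== VERDICT (by name: the statement is the Claim_ definition above) =====
theorem compute_word_diff_spec : Claim_equal_compute_word_diff := by
  intro reference hypothesis _hdom
  unfold Spec_compute_word_diff
  simp only [compute_word_diff, compute_word_diff_alt]
  set refW := PySem.Str.split₀ (PySem.Str.lower reference) with hrefW
  set hypW := PySem.Str.split₀ (PySem.Str.lower hypothesis) with hhypW
  -- A side
  have hA := pvARows_spec refW hypW refW.length 0 (by omega)
  simp only [List.drop_zero, Nat.zero_add] at hA
  have hrow0 : pvRowFn refW hypW 0 = List.range (hypW.length + 1) := by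
    simp only [pvRowFn, pvLev_zero_left]
    exact List.map_id' _
  rw [← hrow0, hA]
  have hops : ∀ i j, i ≤ refW.length → j ≤ hypW.length →
      ((((pvRowFn refW hypW 0, "" :: List.replicate hypW.length "insert") ::
          (List.range refW.length).map
            (fun t => (pvRowFn refW hypW (0 + 1 + t), pvOpsFn refW hypW (0 + 1 + t)))).map (·.2)).getD i []).getD j ""
        = pvOp refW hypW i j := by
    intro i j hi hj
    simp only [List.map_cons, List.map_map, Function.comp_def]
    rw [show ("" :: List.replicate hypW.length "insert") = pvOpsFn refW hypW 0 from
          (pvOpsFn_zero refW hypW).symm,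
        getD_cons_map_range (pvOpsFn refW hypW) refW.length [] i hi]
    simp only [pvOpsFn]
    exact getD_map_range _ _ _ j (by omega)
  rw [pvABack_path refW hypW _ hops (refW.length + hypW.length) refW.length hypW.length []
      (le_refl _) (le_refl _) (le_refl _)]
  -- B side
  have hinit := pvBInit_spec refW hypW hypW.length 0 (by omega)
  simp only [List.drop_zero] at hinit
  rw [← pvCell_zero_zero refW hypW, hinit, ← pvCellFn_cons refW hypW 0]
  have hrows := pvBRows_spec refW hypW refW.length 0 (by omega)
  simp only [List.drop_zero, Nat.zero_add] at hrows
  rw [hrows]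
  simp only [pvCellFn]
  rw [getLastD_map_range (pvCell refW hypW refW.length) hypW.length (pvCell refW hypW 0 0)]
  rw [pvCollect_eq]
  simp [pvCell]
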